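-- pv_equiv track=rewrite | github.com/absarmohammed/Byte-builders_sentinel | src/data_integration.py | _select_optimal_recovery_method
-- ===== SOURCE A (Python) =====
-- from typing import Dict, List, Any, Optional, Tuple, Set
--
-- def _select_optimal_recovery_method(corruption_issues: List[str], stream_name: str) -> str:
--     """Select the best recovery method based on corruption type"""
--
--     # Priority-based selection
--     if any("timestamp" in issue for issue in corruption_issues):
--         return "interpolation"
--     elif any("type" in issue for issue in corruption_issues):
--         return "default_values"
--     elif any("range" in issue for issue in corruption_issues):
--         return "carry_forward"
--     else:
--         return "skip_incomplete"
-- ===== SOURCE B (Python) =====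
-- KEYWORDS = ("timestamp", "type", "range")
-- METHODS = ("interpolation", "default_values", "carry_forward", "skip_incomplete")
--
-- def _select_optimal_recovery_method(corruption_issues, stream_name):
--     """Select the best recovery method based on corruption type.
--
--     Computes the minimal priority rank present in any issue (0=timestamp,
--     1=type, 2=range, 3=none) in a single pass, then indexes the method table."""
--     best = len(KEYWORDS)  # 3 = no keyword found
--     for issue in corruption_issues:
--         for i, kw in enumerate(KEYWORDS):
--             if i < best and kw in issue:
--                 best = i
--                 break
--     return METHODS[best]
-- ===== Notes on version B (the rewrite author's own statement) =====
-- stated objective: alternative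
-- what changed: B computes the minimal priority rank (0..3) present across all issues in a single min-reduction pass and returns METHODS[best] by table indexing, replacing A's per-keyword any() scans and early-return chain.
import Mathlib
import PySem

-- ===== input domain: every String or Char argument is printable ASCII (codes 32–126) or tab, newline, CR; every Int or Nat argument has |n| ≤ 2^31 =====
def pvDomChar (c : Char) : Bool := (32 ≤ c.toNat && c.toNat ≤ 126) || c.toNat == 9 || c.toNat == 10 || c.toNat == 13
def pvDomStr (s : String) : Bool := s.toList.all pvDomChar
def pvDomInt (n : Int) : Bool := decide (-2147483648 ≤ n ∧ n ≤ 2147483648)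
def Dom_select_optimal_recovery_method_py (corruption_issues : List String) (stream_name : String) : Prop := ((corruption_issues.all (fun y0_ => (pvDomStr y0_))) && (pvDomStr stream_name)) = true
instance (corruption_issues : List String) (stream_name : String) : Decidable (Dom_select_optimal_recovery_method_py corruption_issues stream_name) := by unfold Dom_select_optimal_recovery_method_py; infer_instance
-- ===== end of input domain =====

-- B computes the minimal priority rank present across all issues in one pass and indexes a method table, replacing A's per-keyword any() scans and return chain (alternative decomposition, same cost).
-- ===== PORT A =====
def select_optimal_recovery_method_py (corruption_issues : List String) (stream_name : String) : String :=
  if corruption_issues.any (fun issue => PySem.Str.isIn "timestamp" issue) then "interpolation"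
  else if corruption_issues.any (fun issue => PySem.Str.isIn "type" issue) then "default_values"
  else if corruption_issues.any (fun issue => PySem.Str.isIn "range" issue) then "carry_forward"
  else "skip_incomplete"

-- ===== PORT B =====
def pvKeywords : List (Nat × String) := [(0, "timestamp"), (1, "type"), (2, "range")]
def pvMethods : List String := ["interpolation", "default_values", "carry_forward", "skip_incomplete"]

-- B's inner loop: 'for i, kw in enumerate(KEYWORDS): if i < best and kw in issue: best = i; break'
def pvScan : List (Nat × String) → String → Nat → Nat
  | [], _, best => best
  | (i, kw) :: rest, issue, best =>
      if i < best && PySem.Str.isIn kw issue then i else pvScan rest issue best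

def select_optimal_recovery_method_py_alt (corruption_issues : List String) (stream_name : String) : String :=
  let best := corruption_issues.foldl (fun b issue => pvScan pvKeywords issue b) 3
  -- METHODS[best]: best ≤ 3 always, so the getD default is never used
  pvMethods.getD best ""

-- ===== PRECONDITION & SPEC =====
def Spec_select_optimal_recovery_method_py (corruption_issues : List String) (stream_name : String) (out : String) : Prop := out = select_optimal_recovery_method_py_alt corruption_issues stream_name
instance (corruption_issues : List String) (stream_name : String) (out : String) : Decidable (Spec_select_optimal_recovery_method_py corruption_issues stream_name out) := by unfold Spec_select_optimal_recovery_method_py; infer_instance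

-- ===== CLAIM (what is proved, stated in full; the proofs are below) =====
def Claim_equal_select_optimal_recovery_method_py : Prop := ∀ (corruption_issues : List String) (stream_name : String), Dom_select_optimal_recovery_method_py corruption_issues stream_name → Spec_select_optimal_recovery_method_py corruption_issues stream_name (select_optimal_recovery_method_py corruption_issues stream_name)

-- ===== LEMMAS AND PROOFS =====

-- target value of the fold, expressed through A's three any-scans
def pvVal (xs : List String) : Nat :=
  if xs.any (fun issue => PySem.Str.isIn "timestamp" issue) then 0
  else if xs.any (fun issue => PySem.Str.isIn "type" issue) then 1
  else if xs.any (fun issue => PySem.Str.isIn "range" issue) then 2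
  else 3

theorem pv_fold_min (xs : List String) :
    ∀ b : Nat, b ≤ 3 →
      xs.foldl (fun b issue => pvScan pvKeywords issue b) b = min b (pvVal xs) := by
  induction xs with
  | nil => intro b hb; simp [pvVal]; omega
  | cons x xs ih =>
    intro b hb
    have hstep : pvScan pvKeywords x b =
        min b (if PySem.Str.isIn "timestamp" x then 0
               else if PySem.Str.isIn "type" x then 1
               else if PySem.Str.isIn "range" x then 2 else 3) := by
      simp only [pvKeywords, pvScan]
      rcases ht : PySem.Str.isIn "timestamp" x <;>
        rcases hy : PySem.Str.isIn "type" x <;>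
        rcases hr : PySem.Str.isIn "range" x <;>
        simp <;> (try split_ifs) <;> omega
    have hstep_le : pvScan pvKeywords x b ≤ 3 := by rw [hstep]; omega
    rw [List.foldl_cons, ih _ hstep_le, hstep]
    simp only [pvVal, List.any_cons, Bool.or_eq_true]
    rcases ht : PySem.Str.isIn "timestamp" x <;>
      rcases hy : PySem.Str.isIn "type" x <;>
      rcases hr : PySem.Str.isIn "range" x <;>
      rcases ha : xs.any (fun issue => PySem.Str.isIn "timestamp" issue) <;>
      rcases hb2 : xs.any (fun issue => PySem.Str.isIn "type" issue) <;>
      rcases hc : xs.any (fun issue => PySem.Str.isIn "range" issue) <;>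
      simp <;> omega

-- ===== VERDICT (by name: the statement is the Claim_ definition above) =====
theorem select_optimal_recovery_method_py_spec : Claim_equal_select_optimal_recovery_method_py := by
  intro xs stream _
  unfold Spec_select_optimal_recovery_method_py
  unfold select_optimal_recovery_method_py select_optimal_recovery_method_py_alt
  rw [pv_fold_min xs 3 (le_refl 3)]
  unfold pvVal
  split_ifs <;> rfl
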